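-- pv_equiv track=rewrite | github.com/sezilla/JEMS-python_ai | src/model/team_allocator/dataset_generator.py | get_best_available_team
-- ===== SOURCE A (Python) =====
-- department_teams = {
--     1: [1, 2, 3, 4, 5, 6],          # Catering
--     2: [7, 8, 9, 10, 11, 12],       # Hair and Makeup
--     3: [13, 14, 15, 16, 17, 18],    # Photo and Video
--     4: [19, 20, 21, 22, 23, 24],    # Designing
--     5: [25, 26, 27, 28, 29, 30],    # Entertainment
--     6: [31, 32, 33, 34, 35, 36],    # Coordination
-- }
--
-- def is_team_available(team_id, start_date, end_date, team_schedules):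
--     for scheduled_start, scheduled_end in team_schedules.get(team_id, []):
--         # Check if there's an overlap in schedules
--         if not (end_date < scheduled_start or start_date > scheduled_end):
--             return False
--     return True
--
-- def get_best_available_team(department_id, start_date, end_date, team_schedules):
--     available_teams = []
--
--     for team_id in department_teams[department_id]:
--         if is_team_available(team_id, start_date, end_date, team_schedules):
--             # Calculate team load (number of projects assigned)
--             team_load = len(team_schedules.get(team_id, []))
--             available_teams.append((team_id, team_load))
--
--     if available_teams:
--         # Sort by team load (prefer teams with fewer assignments)
--         available_teams.sort(key=lambda x: x[1])
--         return available_teams[0][0]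
--
--     # If no team is fully available, find team with least overlap
--     department_team_ids = department_teams[department_id]
--     if not department_team_ids:
--         return None
--
--     # Fall back to team with fewest assignments
--     team_loads = [(team_id, len(team_schedules.get(team_id, []))) for team_id in department_team_ids]
--     team_loads.sort(key=lambda x: x[1])
--     return team_loads[0][0]
-- ===== SOURCE B (Python) =====
-- department_teams = {
--     1: [1, 2, 3, 4, 5, 6],          # Catering
--     2: [7, 8, 9, 10, 11, 12],       # Hair and Makeup
--     3: [13, 14, 15, 16, 17, 18],    # Photo and Video
--     4: [19, 20, 21, 22, 23, 24],    # Designing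
--     5: [25, 26, 27, 28, 29, 30],    # Entertainment
--     6: [31, 32, 33, 34, 35, 36],    # Coordination
-- }
--
--
-- def _is_available(team_id, start_date, end_date, team_schedules):
--     return all(end_date < s or start_date > e
--                for s, e in team_schedules.get(team_id, []))
--
--
-- def get_best_available_team(department_id, start_date, end_date, team_schedules):
--     # Single pass, in department order: track the least-loaded available team
--     # and the least-loaded team overall (strict '<' keeps the first on ties).
--     best_available = None   # (team_id, load)
--     best_fallback = None    # (team_id, load)
--     for team_id in department_teams[department_id]:
--         load = len(team_schedules.get(team_id, []))
--         if best_fallback is None or load < best_fallback[1]: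
--             best_fallback = (team_id, load)
--         if _is_available(team_id, start_date, end_date, team_schedules) and \
--                 (best_available is None or load < best_available[1]):
--             best_available = (team_id, load)
--     if best_available is not None:
--         return best_available[0]
--     if best_fallback is not None:
--         return best_fallback[0]
--     return None
-- ===== Notes on version B (the rewrite author's own statement) =====
-- stated objective: simpler
-- what changed: Replaces A's two built lists plus stable sorts with one in-order pass over the department's teams that maintains the least-loaded available team and the least-loaded fallback team, updating only on strictly smaller load so ties keep the first team in department order.
import Mathlib
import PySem

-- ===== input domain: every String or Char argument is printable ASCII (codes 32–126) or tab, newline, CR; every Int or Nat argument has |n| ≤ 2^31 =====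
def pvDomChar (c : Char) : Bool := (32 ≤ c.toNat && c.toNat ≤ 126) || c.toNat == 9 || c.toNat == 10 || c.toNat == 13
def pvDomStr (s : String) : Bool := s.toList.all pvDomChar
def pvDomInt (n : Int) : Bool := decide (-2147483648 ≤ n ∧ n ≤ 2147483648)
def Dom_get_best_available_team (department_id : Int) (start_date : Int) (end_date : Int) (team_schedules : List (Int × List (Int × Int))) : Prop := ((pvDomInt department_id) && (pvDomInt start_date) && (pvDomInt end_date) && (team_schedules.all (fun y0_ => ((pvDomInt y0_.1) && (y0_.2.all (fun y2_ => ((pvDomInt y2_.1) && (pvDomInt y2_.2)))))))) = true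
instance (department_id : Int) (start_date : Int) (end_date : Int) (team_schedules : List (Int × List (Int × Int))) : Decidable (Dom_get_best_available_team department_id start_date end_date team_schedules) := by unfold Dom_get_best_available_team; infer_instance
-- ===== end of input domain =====

-- B replaces A's build-two-lists-and-stable-sort with a single in-order pass keeping the
-- least-loaded available team and least-loaded fallback team (strict '<' preserves ties);
-- objective: simpler (and no sort).

-- ===== PORT A =====
-- the module constant department_teams
def pvDeptTeams : PySem.Dict Int (List Int) :=
  ⟨[(1, [1, 2, 3, 4, 5, 6]), (2, [7, 8, 9, 10, 11, 12]), (3, [13, 14, 15, 16, 17, 18]),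
    (4, [19, 20, 21, 22, 23, 24]), (5, [25, 26, 27, 28, 29, 30]), (6, [31, 32, 33, 34, 35, 36])]⟩

-- is_team_available: 'return False on first overlap, else True' = all pairs non-overlapping
def pvIsAvail (team_id : Int) (start_date : Int) (end_date : Int) (team_schedules : List (Int × List (Int × Int))) : Bool :=
  (PySem.Dict.getD ⟨team_schedules⟩ team_id []).all
    (fun p => decide (end_date < p.1) || decide (start_date > p.2))

def get_best_available_team (department_id : Int) (start_date : Int) (end_date : Int) (team_schedules : List (Int × List (Int × Int))) : Option Int :=
  let teams := PySem.Dict.getD pvDeptTeams department_id []   -- Pre_ makes the lookup succeed (Python raises KeyError otherwise)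
  let available_teams := teams.foldl
    (fun acc team_id =>
      if pvIsAvail team_id start_date end_date team_schedules then
        acc ++ [(team_id, PySem.List.len (PySem.Dict.getD ⟨team_schedules⟩ team_id []))]
      else acc) []
  if available_teams ≠ [] then
    match PySem.List.sorted available_teams (fun x => x.2) with
    | p :: _ => some p.1
    | [] => none            -- unreachable: the branch condition says available_teams ≠ []
  else
    if teams = [] then none
    else
      let team_loads := teams.map
        (fun team_id => (team_id, PySem.List.len (PySem.Dict.getD ⟨team_schedules⟩ team_id [])))
      match PySem.List.sorted team_loads (fun x => x.2) with
      | p :: _ => some p.1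
      | [] => none          -- unreachable: teams ≠ [] here

-- ===== PORT B =====
def pvAltAvail (team_id : Int) (start_date : Int) (end_date : Int) (team_schedules : List (Int × List (Int × Int))) : Bool :=
  (PySem.Dict.getD ⟨team_schedules⟩ team_id []).all
    (fun q => decide (end_date < q.1) || decide (start_date > q.2))

def get_best_available_team_alt (department_id : Int) (start_date : Int) (end_date : Int) (team_schedules : List (Int × List (Int × Int))) : Option Int :=
  let teams := PySem.Dict.getD pvDeptTeams department_id []
  let r := teams.foldl
    (fun (acc : Option (Int × Int) × Option (Int × Int)) team_id =>
      let load := PySem.List.len (PySem.Dict.getD ⟨team_schedules⟩ team_id [])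
      let fb := match acc.2 with
        | none => some (team_id, load)
        | some p => if load < p.2 then some (team_id, load) else some p
      let av := if pvAltAvail team_id start_date end_date team_schedules then
          match acc.1 with
          | none => some (team_id, load)
          | some p => if load < p.2 then some (team_id, load) else some p
        else acc.1
      (av, fb)) (none, none)
  match r.1 with
  | some p => some p.1
  | none =>
    match r.2 with
    | some p => some p.1
    | none => none

-- ===== PRECONDITION & SPEC =====
-- Pre_ excludes exactly the department ids not in the module dict, where Python A raises KeyError.
def Pre_get_best_available_team (department_id : Int) (start_date : Int) (end_date : Int) (team_schedules : List (Int × List (Int × Int))) : Prop :=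
  1 ≤ department_id ∧ department_id ≤ 6
instance (department_id : Int) (start_date : Int) (end_date : Int) (team_schedules : List (Int × List (Int × Int))) : Decidable (Pre_get_best_available_team department_id start_date end_date team_schedules) := by unfold Pre_get_best_available_team; infer_instance

def pvWitness_get_best_available_team : Int × Int × Int × (List (Int × List (Int × Int))) :=
  (1, 0, 5, [(1, [(2, 3)]), (2, [])])

def Spec_get_best_available_team (department_id : Int) (start_date : Int) (end_date : Int) (team_schedules : List (Int × List (Int × Int))) (out : Option Int) : Prop := out = get_best_available_team_alt department_id start_date end_date team_schedules
instance (department_id : Int) (start_date : Int) (end_date : Int) (team_schedules : List (Int × List (Int × Int))) (out : Option Int) : Decidable (Spec_get_best_available_team department_id start_date end_date team_schedules out) := by unfold Spec_get_best_available_team; infer_instance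

-- ===== CLAIM (what is proved, stated in full; the proofs are below) =====
def Claim_equal_get_best_available_team : Prop := ∀ (department_id : Int) (start_date : Int) (end_date : Int) (team_schedules : List (Int × List (Int × Int))), Dom_get_best_available_team department_id start_date end_date team_schedules → Pre_get_best_available_team department_id start_date end_date team_schedules → Spec_get_best_available_team department_id start_date end_date team_schedules (get_best_available_team department_id start_date end_date team_schedules)

-- ===== LEMMAS AND PROOFS =====

-- strict-min step: what one iteration of B's loop does to either accumulator
def pvStep (b : Option (Int × Int)) (x : Int × Int) : Option (Int × Int) :=
  match b with
  | none => some x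
  | some p => if x.2 < p.2 then some x else some p

-- head of a stable insertion = strict-min step on the head
theorem pvHead_insertBy (x : Int × Int) (ys : List (Int × Int)) :
    (PySem.List.insertBy (fun a b => decide (a.2 < b.2)) x ys).head? = pvStep ys.head? x := by
  cases ys with
  | nil => simp [PySem.List.insertBy, pvStep]
  | cons y t =>
    simp only [PySem.List.insertBy, pvStep]
    by_cases h : x.2 < y.2 <;> simp [h]

theorem pvHead_foldl_insertBy (l : List (Int × Int)) (acc : List (Int × Int)) :
    (l.foldl (fun a x => PySem.List.insertBy (fun p q => decide (p.2 < q.2)) x a) acc).head?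
      = l.foldl pvStep acc.head? := by
  induction l generalizing acc with
  | nil => rfl
  | cons x t ih => simp only [List.foldl_cons, ih, pvHead_insertBy]

-- head of Python's stable sort by load = B's strict-'<' first-minimum fold
theorem pvHead_sorted (l : List (Int × Int)) :
    (PySem.List.sorted l (fun x => x.2)).head? = l.foldl pvStep none := by
  rw [PySem.List.sorted_eq_foldl_insertBy]
  exact pvHead_foldl_insertBy l []

theorem pvFoldl_step_some (l : List (Int × Int)) (p : Int × Int) :
    ∃ q, l.foldl pvStep (some p) = some q := by
  induction l generalizing p with
  | nil => exact ⟨p, rfl⟩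
  | cons x t ih =>
    rw [List.foldl_cons]
    by_cases h : x.2 < p.2
    · have hx : pvStep (some p) x = some x := by simp [pvStep, h]
      rw [hx]; exact ih x
    · have hx : pvStep (some p) x = some p := by simp [pvStep, h]
      rw [hx]; exact ih p

-- B's single pass computes the strict-min fold of the available pairs and of all pairs
theorem pvAltFold (start_date end_date : Int) (team_schedules : List (Int × List (Int × Int)))
    (teams : List Int) (a0 b0 : Option (Int × Int)) :
    (teams.foldl
      (fun (acc : Option (Int × Int) × Option (Int × Int)) team_id =>
        let load := PySem.List.len (PySem.Dict.getD ⟨team_schedules⟩ team_id [])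
        let fb := match acc.2 with
          | none => some (team_id, load)
          | some p => if load < p.2 then some (team_id, load) else some p
        let av := if pvAltAvail team_id start_date end_date team_schedules then
            match acc.1 with
            | none => some (team_id, load)
            | some p => if load < p.2 then some (team_id, load) else some p
          else acc.1
        (av, fb)) (a0, b0))
    = (((teams.filter (fun t => pvAltAvail t start_date end_date team_schedules)).map
          (fun t => (t, PySem.List.len (PySem.Dict.getD ⟨team_schedules⟩ t [])))).foldl pvStep a0,
       ((teams.map (fun t => (t, PySem.List.len (PySem.Dict.getD ⟨team_schedules⟩ t [])))).foldl pvStep b0)) := by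
  induction teams generalizing a0 b0 with
  | nil => rfl
  | cons t ts ih =>
    by_cases h : pvAltAvail t start_date end_date team_schedules
    · simp only [List.foldl_cons, List.filter_cons, List.map_cons, h, if_pos, ih]
      cases a0 <;> cases b0 <;> simp [pvStep]
    · simp only [List.foldl_cons, List.filter_cons, List.map_cons, h, ih]
      simp only [Bool.false_eq_true, if_false]
      cases b0 <;> simp [pvStep]

-- ===== VERDICT (by name: the statement is the Claim_ definition above) =====
theorem get_best_available_team_spec : Claim_equal_get_best_available_team := by
  intro d s e ts _ _
  unfold Spec_get_best_available_team get_best_available_team get_best_available_team_alt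
  simp only [ne_eq]
  rw [pvAltFold s e ts (PySem.Dict.getD pvDeptTeams d []) none none]
  have h1 : (PySem.Dict.getD pvDeptTeams d []).foldl
      (fun acc team_id =>
        if pvIsAvail team_id s e ts then
          acc ++ [(team_id, PySem.List.len (PySem.Dict.getD ⟨ts⟩ team_id []))]
        else acc) []
      = ((PySem.Dict.getD pvDeptTeams d []).filter (fun t => pvIsAvail t s e ts)).map
          (fun t => (t, PySem.List.len (PySem.Dict.getD ⟨ts⟩ t []))) := by
    simp only [PySem.List.foldl_append_if, List.nil_append]
  have hps : (fun t : Int => pvIsAvail t s e ts) = (fun t => pvAltAvail t s e ts) := rfl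
  rw [h1, hps]
  generalize hvail : ((PySem.Dict.getD pvDeptTeams d []).filter (fun t => pvAltAvail t s e ts)).map
      (fun t => (t, PySem.List.len (PySem.Dict.getD ⟨ts⟩ t []))) = avail
  generalize hall : (PySem.Dict.getD pvDeptTeams d []).map
      (fun t => (t, PySem.List.len (PySem.Dict.getD ⟨ts⟩ t []))) = allp
  by_cases hA : avail = []
  · rw [hA, if_neg (by simp), List.foldl_nil]
    by_cases hT : PySem.Dict.getD pvDeptTeams d [] = []
    · have hap : allp = [] := by rw [← hall, hT]; rfl
      rw [if_pos hT, hap]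
      rfl
    · rw [if_neg hT]
      have hne : allp ≠ [] := by rw [← hall]; simpa using hT
      cases allp with
      | nil => exact absurd rfl hne
      | cons y ys =>
        obtain ⟨q, hq⟩ := pvFoldl_step_some ys y
        have hfold : List.foldl pvStep none (y :: ys) = some q := by
          rw [List.foldl_cons]; exact hq
        have h2 := pvHead_sorted (y :: ys)
        rw [hfold] at h2
        rw [hfold]
        cases hs : PySem.List.sorted (y :: ys) (fun x => x.2) with
        | nil => exact absurd ((PySem.List.sorted_eq_nil_iff _ _ _).mp hs) (by simp)
        | cons p rest =>
          rw [hs, List.head?_cons] at h2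
          rw [Option.some.inj h2]
  · cases avail with
    | nil => exact absurd rfl hA
    | cons x xs =>
      rw [if_pos (by simp)]
      obtain ⟨q, hq⟩ := pvFoldl_step_some xs x
      have hfold : List.foldl pvStep none (x :: xs) = some q := by
        rw [List.foldl_cons]; exact hq
      have h2 := pvHead_sorted (x :: xs)
      rw [hfold] at h2
      rw [hfold]
      cases hs : PySem.List.sorted (x :: xs) (fun x => x.2) with
      | nil => exact absurd ((PySem.List.sorted_eq_nil_iff _ _ _).mp hs) (by simp)
      | cons p rest =>
        rw [hs, List.head?_cons] at h2
        rw [Option.some.inj h2]
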